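-- pv_equiv track=rewrite | github.com/TomLouwers/websitesara | tools/new/quality_pack_checks.py | parse_path_meta
-- ===== SOURCE A (Python) =====
-- from typing import Any, Dict, List, Tuple
--
-- def parse_path_meta(path: str) -> Dict[str, str]:
--     p = path.replace("\\", "/")
--     parts = p.split("/")
--     meta = {"domain": "", "group": "", "level": "", "topic": ""}
--
--     if "nl-NL" in parts:
--         i = parts.index("nl-NL")
--         if i + 1 < len(parts):
--             meta["domain"] = parts[i + 1]
--
--     for part in parts:
--         if part.startswith("groep-"):
--             meta["group"] = part
--         if part in ("n1", "n2", "n3", "n4"):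
--             meta["level"] = part
--
--     if "topics" in parts:
--         j = parts.index("topics")
--         if j + 1 < len(parts):
--             meta["topic"] = parts[j + 1]
--
--     return meta
-- ===== SOURCE B (Python) =====
-- def parse_path_meta(path):
--     # Single right-to-left pass: each element is processed together with its
--     # successor `nxt`; leftmost "nl-NL"/"topics" wins by overwriting, rightmost
--     # "groep-*"/level wins by only setting when still unset.
--     parts = path.replace("\\", "/").split("/")
--     domain = group = level = topic = ""
--     nxt = None
--     for part in reversed(parts):
--         if part == "nl-NL":
--             domain = nxt if nxt is not None else ""
--         if part == "topics":
--             topic = nxt if nxt is not None else ""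
--         if part.startswith("groep-") and not group:
--             group = part
--         if part in ("n1", "n2", "n3", "n4") and not level:
--             level = part
--         nxt = part
--     return {"domain": domain, "group": group, "level": level, "topic": topic}
-- ===== Notes on version B (the rewrite author's own statement) =====
-- stated objective: alternative
-- what changed: Replaced A's three separate passes (index/lookup for nl-NL, a forward loop for group/level, index/lookup for topics) by one right-to-left pass that pairs each segment with its successor and uses overwrite-vs-set-once to get first-wins/last-wins semantics.
import Mathlib
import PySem

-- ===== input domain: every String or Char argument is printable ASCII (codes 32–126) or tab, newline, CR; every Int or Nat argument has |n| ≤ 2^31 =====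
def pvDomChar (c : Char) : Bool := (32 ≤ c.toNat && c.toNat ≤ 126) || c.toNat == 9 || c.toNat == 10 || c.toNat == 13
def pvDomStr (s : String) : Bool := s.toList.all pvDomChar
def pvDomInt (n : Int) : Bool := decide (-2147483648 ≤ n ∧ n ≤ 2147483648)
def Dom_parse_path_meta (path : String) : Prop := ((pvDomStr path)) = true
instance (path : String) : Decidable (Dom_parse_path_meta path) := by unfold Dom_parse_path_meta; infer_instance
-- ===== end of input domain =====

-- B replaces A's three passes over the path segments by one right-to-left pass
-- carrying the successor segment; same cost, different decomposition ("alternative").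

-- ===== PORT A =====
def parse_path_meta (path : String) : List (String × String) :=
  let p := PySem.Str.replace path "\\" "/"
  let parts := (PySem.Str.split? p "/").getD []
  let m0 : PySem.Dict String String :=
    PySem.Dict.ofList [("domain", ""), ("group", ""), ("level", ""), ("topic", "")]
  let m1 :=
    if "nl-NL" ∈ parts then
      match PySem.List.index? parts "nl-NL" with
      | some i =>
        if (i : Int) + 1 < (parts.length : Int) then
          PySem.Dict.insert m0 "domain" (PySem.List.pyGetD parts ((i : Int) + 1) "")
        else m0
      | none => m0
    else m0
  let m2 := parts.foldl (fun m part =>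
      let m := if PySem.Str.startswith part "groep-" then PySem.Dict.insert m "group" part else m
      if part = "n1" ∨ part = "n2" ∨ part = "n3" ∨ part = "n4" then PySem.Dict.insert m "level" part else m) m1
  let m3 :=
    if "topics" ∈ parts then
      match PySem.List.index? parts "topics" with
      | some j =>
        if (j : Int) + 1 < (parts.length : Int) then
          PySem.Dict.insert m2 "topic" (PySem.List.pyGetD parts ((j : Int) + 1) "")
        else m2
      | none => m2
    else m2
  m3.items

-- ===== PORT B =====
-- state: (domain, group, level, topic, nxt); foldr = Python's loop over reversed(parts)
def pmStepB (part : String) (st : String × String × String × String × Option String) :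
    String × String × String × String × Option String :=
  let (d, g, l, t, nxt) := st
  let d := if part = "nl-NL" then nxt.getD "" else d
  let t := if part = "topics" then nxt.getD "" else t
  let g := if PySem.Str.startswith part "groep-" ∧ g = "" then part else g
  let l := if (part = "n1" ∨ part = "n2" ∨ part = "n3" ∨ part = "n4") ∧ l = "" then part else l
  (d, g, l, t, some part)

def parse_path_meta_alt (path : String) : List (String × String) :=
  let parts := (PySem.Str.split? (PySem.Str.replace path "\\" "/") "/").getD []
  let st := parts.foldr pmStepB ("", "", "", "", none)
  [("domain", st.1), ("group", st.2.1), ("level", st.2.2.1), ("topic", st.2.2.2.1)]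

-- ===== PRECONDITION & SPEC =====
def Spec_parse_path_meta (path : String) (out : List (String × String)) : Prop := out = parse_path_meta_alt path
instance (path : String) (out : List (String × String)) : Decidable (Spec_parse_path_meta path out) := by unfold Spec_parse_path_meta; infer_instance

-- ===== CLAIM (what is proved, stated in full; the proofs are below) =====
def Claim_equal_parse_path_meta : Prop := ∀ (path : String), Dom_parse_path_meta path → Spec_parse_path_meta path (parse_path_meta path)

-- ===== LEMMAS AND PROOFS =====

-- value of the segment following the FIRST occurrence of `key` ("" if none)
def fstNext (key : String) : List String → String
  | [] => ""
  | x :: r => if x = key then (r.head?.getD "") else fstNext key r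

-- LAST segment starting with "groep-" ("" if none)
def lastG : List String → String
  | [] => ""
  | x :: r => if lastG r ≠ "" then lastG r else (if PySem.Str.startswith x "groep-" then x else "")

-- LAST segment among n1..n4 ("" if none)
def lastL : List String → String
  | [] => ""
  | x :: r => if lastL r ≠ "" then lastL r
      else (if x = "n1" ∨ x = "n2" ∨ x = "n3" ∨ x = "n4" then x else "")

-- B's set-once update equals the "keep later match" selector
theorem set_once_step (x g : String) (s : Prop) [Decidable s] :
    (if s ∧ g = "" then x else g) = (if g ≠ "" then g else if s then x else "") := by
  by_cases hg : g = "" <;> by_cases hs : s <;> simp [hg, hs]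

-- A's last-wins fold step equals the selector, when matches are nonempty
theorem last_wins_step (x b L : String) (s : Prop) [Decidable s] (hx : s → x ≠ "") :
    (if (if L ≠ "" then L else if s then x else "") = "" then b
      else (if L ≠ "" then L else if s then x else "")) =
    (if L = "" then (if s then x else b) else L) := by
  by_cases hL : L = "" <;> by_cases hs : s <;> simp [hL, hs, hx]

theorem startswith_ne_empty {x : String} (h : PySem.Str.startswith x "groep-" = true) : x ≠ "" := by
  intro he; subst he; exact absurd h (by decide)

theorem level_ne_empty {x : String} (h : x = "n1" ∨ x = "n2" ∨ x = "n3" ∨ x = "n4") : x ≠ "" := by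
  rcases h with h | h | h | h <;> simp [h]

theorem foldrB_eq (parts : List String) :
    parts.foldr pmStepB ("", "", "", "", none) =
      (fstNext "nl-NL" parts, lastG parts, lastL parts, fstNext "topics" parts, parts.head?) := by
  induction parts with
  | nil => simp [fstNext, lastG, lastL]
  | cons x r ih =>
    simp only [List.foldr_cons, ih, pmStepB, List.head?_cons]
    rw [set_once_step x (lastG r) _, set_once_step x (lastL r) _]
    simp [fstNext, lastG, lastL]

-- the dict literal of A, in items form
theorem ofList4_eq : (PySem.Dict.ofList [("domain", ""), ("group", ""), ("level", ""), ("topic", "")] :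
    PySem.Dict String String) =
    ⟨[("domain", ""), ("group", ""), ("level", ""), ("topic", "")]⟩ := by decide

-- A's group/level loop on a 4-entry dict of this key shape
theorem loopA (parts : List String) : ∀ a b c d2 : String,
    parts.foldl (fun m part =>
        let m := if PySem.Str.startswith part "groep-" then PySem.Dict.insert m "group" part else m
        if part = "n1" ∨ part = "n2" ∨ part = "n3" ∨ part = "n4" then PySem.Dict.insert m "level" part else m)
      (⟨[("domain", a), ("group", b), ("level", c), ("topic", d2)]⟩ : PySem.Dict String String) =
      ⟨[("domain", a), ("group", if lastG parts = "" then b else lastG parts),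
       ("level", if lastL parts = "" then c else lastL parts), ("topic", d2)]⟩ := by
  induction parts with
  | nil => intro a b c d2; simp [lastG, lastL]
  | cons x r ih =>
    intro a b c d2
    simp only [List.foldl_cons]
    have step : (if x = "n1" ∨ x = "n2" ∨ x = "n3" ∨ x = "n4" then
        PySem.Dict.insert (if PySem.Str.startswith x "groep-" then
          PySem.Dict.insert (⟨[("domain", a), ("group", b), ("level", c), ("topic", d2)]⟩ : PySem.Dict String String) "group" x
          else (⟨[("domain", a), ("group", b), ("level", c), ("topic", d2)]⟩ : PySem.Dict String String)) "level" x
        else (if PySem.Str.startswith x "groep-" then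
          PySem.Dict.insert (⟨[("domain", a), ("group", b), ("level", c), ("topic", d2)]⟩ : PySem.Dict String String) "group" x
          else (⟨[("domain", a), ("group", b), ("level", c), ("topic", d2)]⟩ : PySem.Dict String String))) =
        (⟨[("domain", a), ("group", if PySem.Str.startswith x "groep-" then x else b),
         ("level", if x = "n1" ∨ x = "n2" ∨ x = "n3" ∨ x = "n4" then x else c), ("topic", d2)]⟩ :
          PySem.Dict String String) := by
      by_cases hs : PySem.Str.startswith x "groep-"
      · rw [if_pos hs]
        simp at hs
        by_cases hn : x = "n1" ∨ x = "n2" ∨ x = "n3" ∨ x = "n4"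
        · rw [if_pos hn]; simp [PySem.Dict.insert, hs, hn]
        · rw [if_neg hn]; simp [PySem.Dict.insert, hs, hn]
      · rw [if_neg hs]
        simp at hs
        by_cases hn : x = "n1" ∨ x = "n2" ∨ x = "n3" ∨ x = "n4"
        · rw [if_pos hn]; simp [PySem.Dict.insert, hs, hn]
        · rw [if_neg hn]; simp [hs, hn]
    rw [step, ih]
    simp only [lastG, lastL]
    rw [last_wins_step x b (lastG r) _ startswith_ne_empty,
        last_wins_step x c (lastL r) _ level_ne_empty]

theorem fstNext_of_not_mem {key : String} {parts : List String} (h : key ∉ parts) :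
    fstNext key parts = "" := by
  induction parts with
  | nil => rfl
  | cons x r ih =>
    simp only [List.mem_cons, not_or] at h
    simp [fstNext, Ne.symm h.1, ih h.2]

theorem fstNext_of_index {key : String} {parts : List String} {i : Nat}
    (h : PySem.List.index? parts key = some i) :
    fstNext key parts = (parts[i + 1]?).getD "" := by
  induction parts generalizing i with
  | nil => rw [PySem.List.index?_eq_idxOf?] at h; simp at h
  | cons x r ih =>
    by_cases hx : x = key
    · subst hx
      rw [PySem.List.index?_cons_self] at h
      cases h
      simp [fstNext, List.getElem?_cons_succ, List.head?_eq_getElem?]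
    · rw [PySem.List.index?_cons_of_ne r hx] at h
      cases hr : PySem.List.index? r key with
      | none => rw [hr] at h; simp at h
      | some j =>
        rw [hr] at h; simp at h
        subst h
        simp [fstNext, hx, ih hr, List.getElem?_cons_succ]

theorem getD_succ_eq (parts : List String) (i : Nat) :
    PySem.List.pyGetD parts ((i : Int) + 1) "" = (parts[i + 1]?).getD "" := by
  have hc : ((i : Int) + 1) = ((i + 1 : Nat) : Int) := by push_cast; ring
  rw [hc, PySem.List.pyGetD_natCast]
  simp [List.getD]

-- ===== VERDICT (by name: the statement is the Claim_ definition above) =====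
theorem parse_path_meta_spec : Claim_equal_parse_path_meta := by
  intro path _
  unfold Spec_parse_path_meta
  simp only [parse_path_meta, parse_path_meta_alt]
  rw [foldrB_eq]
  generalize (PySem.Str.split? (PySem.Str.replace path "\\" "/") "/").getD [] = parts
  rw [ofList4_eq]
  have hdom : (if "nl-NL" ∈ parts then
       match PySem.List.index? parts "nl-NL" with
       | some i =>
         if (i : Int) + 1 < (parts.length : Int) then
           PySem.Dict.insert (⟨[("domain", ""), ("group", ""), ("level", ""), ("topic", "")]⟩ : PySem.Dict String String)
             "domain" (PySem.List.pyGetD parts ((i : Int) + 1) "")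
         else (⟨[("domain", ""), ("group", ""), ("level", ""), ("topic", "")]⟩ : PySem.Dict String String)
       | none => (⟨[("domain", ""), ("group", ""), ("level", ""), ("topic", "")]⟩ : PySem.Dict String String)
     else (⟨[("domain", ""), ("group", ""), ("level", ""), ("topic", "")]⟩ : PySem.Dict String String)) =
      (⟨[("domain", fstNext "nl-NL" parts), ("group", ""), ("level", ""), ("topic", "")]⟩ : PySem.Dict String String) := by
    by_cases hm : "nl-NL" ∈ parts
    · cases hi : PySem.List.index? parts "nl-NL" with
      | none => exact absurd ((PySem.List.index?_eq_none_iff parts _).mp hi) (by simpa using hm)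
      | some i =>
        have hval := fstNext_of_index hi
        by_cases hlt : (i : Int) + 1 < (parts.length : Int)
        · rw [hval, ← getD_succ_eq parts i]
          simp [hm, hlt, PySem.Dict.insert]
        · have hge : parts.length ≤ i + 1 := by omega
          have hz : fstNext "nl-NL" parts = "" := by
            rw [hval, List.getElem?_eq_none hge]; rfl
          simp [hm, hlt, hz]
    · simp [hm, fstNext_of_not_mem hm]
  rw [hdom, loopA]
  have htop : ∀ D G L : String, (if "topics" ∈ parts then
       match PySem.List.index? parts "topics" with
       | some j =>
         if (j : Int) + 1 < (parts.length : Int) then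
           PySem.Dict.insert (⟨[("domain", D), ("group", G), ("level", L), ("topic", "")]⟩ : PySem.Dict String String)
             "topic" (PySem.List.pyGetD parts ((j : Int) + 1) "")
         else (⟨[("domain", D), ("group", G), ("level", L), ("topic", "")]⟩ : PySem.Dict String String)
       | none => (⟨[("domain", D), ("group", G), ("level", L), ("topic", "")]⟩ : PySem.Dict String String)
     else (⟨[("domain", D), ("group", G), ("level", L), ("topic", "")]⟩ : PySem.Dict String String)) =
      (⟨[("domain", D), ("group", G), ("level", L), ("topic", fstNext "topics" parts)]⟩ : PySem.Dict String String) := by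
    intro D G L
    by_cases hm : "topics" ∈ parts
    · cases hi : PySem.List.index? parts "topics" with
      | none => exact absurd ((PySem.List.index?_eq_none_iff parts _).mp hi) (by simpa using hm)
      | some j =>
        have hval := fstNext_of_index hi
        by_cases hlt : (j : Int) + 1 < (parts.length : Int)
        · rw [hval, ← getD_succ_eq parts j]
          simp [hm, hlt, PySem.Dict.insert]
        · have hge : parts.length ≤ j + 1 := by omega
          have hz : fstNext "topics" parts = "" := by
            rw [hval, List.getElem?_eq_none hge]; rfl
          simp [hm, hlt, hz]
    · simp [hm, fstNext_of_not_mem hm]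
  rw [htop]
  by_cases hg : lastG parts = "" <;> by_cases hl : lastL parts = "" <;> simp [hg, hl]
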